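-- pv_equiv track=rewrite | github.com/patrickziegler/spotify-recorder | spotify_recorder/watchdog.py | bus_name_filter_default
-- ===== SOURCE A (Python) =====
-- def bus_name_filter_default(names):
--     """Selecting the bus name to be used for monitoring
--
--     This filter prefers the spotify client (if found) over firefox
--     and will throw an error if multiple firefox instances (or none
--     at all) were found
--
--     Args:
--         names (list of str): candidates to chose from
--
--     Return:
--         the chosen bus name as str
--     """
--
--     # TODO: also check for other browsers / integrations
--     firefox_instances = list()
--
--     for name in names:
--         if "spotify" in name:
--             return name
--         elif "firefox" in name:
--             firefox_instances.append(name)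
--
--     if len(firefox_instances) > 1:
--         raise EnvironmentError("Multiple firefox dbus instances found")
--
--     try:
--         return firefox_instances[0]
--     except IndexError:
--         raise EnvironmentError("No mpris interface found")
-- ===== SOURCE B (Python) =====
-- def bus_name_filter_default(names):
--     """Selecting the bus name to be used for monitoring (two-pass version)."""
--     spotify = next((n for n in names if "spotify" in n), None)
--     if spotify is not None:
--         return spotify
--     firefox = [n for n in names if "firefox" in n]
--     if len(firefox) > 1:
--         raise EnvironmentError("Multiple firefox dbus instances found")
--     if firefox:
--         return firefox[0]
--     raise EnvironmentError("No mpris interface found")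
-- ===== Notes on version B (the rewrite author's own statement) =====
-- stated objective: simpler
-- what changed: Replaces A's single fused early-exit loop with a firefox accumulator by two separate passes: a first-match search for a spotify name, then a filter for firefox names checked afterwards.
import Mathlib
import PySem

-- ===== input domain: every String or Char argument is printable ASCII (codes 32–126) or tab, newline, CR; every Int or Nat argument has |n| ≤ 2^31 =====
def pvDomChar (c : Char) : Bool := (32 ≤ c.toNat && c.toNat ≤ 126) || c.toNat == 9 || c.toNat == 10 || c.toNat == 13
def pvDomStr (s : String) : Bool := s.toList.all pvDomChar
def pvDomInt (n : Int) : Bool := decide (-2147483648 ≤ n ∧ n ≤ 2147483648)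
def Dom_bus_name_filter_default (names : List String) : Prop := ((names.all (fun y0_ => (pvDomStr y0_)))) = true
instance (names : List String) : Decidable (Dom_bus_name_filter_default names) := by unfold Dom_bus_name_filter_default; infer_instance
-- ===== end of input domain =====

-- B changes the decomposition: A's single fused early-exit loop with a firefox accumulator
-- becomes two separate passes (spotify first-match, then a firefox filter); objective: simpler.
-- A raises EnvironmentError on some inputs; those are excluded by Pre_ and the ports return "" there.

-- ===== PORT A =====
-- literal transliteration of A's loop: early return on spotify, accumulate firefox names;
-- the two 'raise EnvironmentError' paths (Pre_ excludes them) are rendered as "".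
def busA_loop (names ff : List String) : String :=
  match names with
  | [] =>
    if ff.length > 1 then ""          -- raise: Multiple firefox dbus instances found
    else
      match ff with
      | x :: _ => x
      | [] => ""                      -- raise: No mpris interface found
  | n :: rest =>
    if PySem.Str.isIn "spotify" n then n
    else if PySem.Str.isIn "firefox" n then busA_loop rest (ff ++ [n])
    else busA_loop rest ff

def bus_name_filter_default (names : List String) : String :=
  busA_loop names []

-- ===== PORT B =====
-- transliteration of Source B: first pass = first spotify match, second pass = firefox filter;
-- the two raise paths (excluded by Pre_) are rendered as "".
def bus_name_filter_default_alt (names : List String) : String :=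
  match names.find? (fun n => PySem.Str.isIn "spotify" n) with
  | some n => n
  | none =>
    let firefox := names.filter (fun n => PySem.Str.isIn "firefox" n)
    if firefox.length > 1 then ""     -- raise: Multiple firefox dbus instances found
    else
      match firefox with
      | x :: _ => x
      | [] => ""                      -- raise: No mpris interface found

-- ===== PRECONDITION & SPEC =====
-- Pre_ excludes exactly the inputs where A raises EnvironmentError: no spotify name and
-- the number of firefox names is not exactly one.
def Pre_bus_name_filter_default (names : List String) : Prop :=
  (names.any (fun n => PySem.Str.isIn "spotify" n)) = true ∨
  names.countP (fun n => PySem.Str.isIn "firefox" n) = 1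
instance (names : List String) : Decidable (Pre_bus_name_filter_default names) := by
  unfold Pre_bus_name_filter_default; infer_instance

def pvWitness_bus_name_filter_default : List String := ["org.mpris.MediaPlayer2.spotify"]

def Spec_bus_name_filter_default (names : List String) (out : String) : Prop := out = bus_name_filter_default_alt names
instance (names : List String) (out : String) : Decidable (Spec_bus_name_filter_default names out) := by unfold Spec_bus_name_filter_default; infer_instance

-- ===== CLAIM (what is proved, stated in full; the proofs are below) =====
def Claim_equal_bus_name_filter_default : Prop := ∀ (names : List String), Dom_bus_name_filter_default names → Pre_bus_name_filter_default names → Spec_bus_name_filter_default names (bus_name_filter_default names)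

-- ===== LEMMAS AND PROOFS =====

-- the common "finish" shape both ports apply to the list of firefox names
def busFinish (l : List String) : String :=
  if l.length > 1 then ""
  else
    match l with
    | x :: _ => x
    | [] => ""

theorem busA_loop_eq (names : List String) : ∀ ff : List String,
    busA_loop names ff =
      match names.find? (fun n => PySem.Str.isIn "spotify" n) with
      | some n => n
      | none => busFinish (ff ++ names.filter (fun n => PySem.Str.isIn "firefox" n)) := by
  induction names with
  | nil => intro ff; simp [busA_loop, busFinish]
  | cons n rest ih =>
    intro ff
    rw [busA_loop]
    by_cases hs : PySem.Str.isIn "spotify" n = true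
    · rw [if_pos hs, List.find?_cons_of_pos hs]
    · rw [if_neg hs, List.find?_cons_of_neg (by simpa using hs)]
      by_cases hf : PySem.Str.isIn "firefox" n = true
      · rw [if_pos hf, ih, List.filter_cons_of_pos hf, ← List.append_cons]
      · rw [if_neg hf, ih, List.filter_cons_of_neg (by simpa using hf)]

-- ===== VERDICT (by name: the statement is the Claim_ definition above) =====
theorem bus_name_filter_default_spec : Claim_equal_bus_name_filter_default := by
  intro names _ _
  unfold Spec_bus_name_filter_default bus_name_filter_default bus_name_filter_default_alt
  rw [busA_loop_eq]
  cases names.find? (fun n => PySem.Str.isIn "spotify" n) <;> simp [busFinish]
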